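-- pv_equiv track=rewrite | github.com/TRON-Bioinformatics/easyquant | src/bp_quant/counting.py | get_spanning_intervals
-- ===== SOURCE A (Python) =====
-- def get_spanning_intervals(intervals: list, r1_interval: str, r2_interval: str) -> list:
--     """Returns the intervals the spanning pair uses."""
--     start = False
--     spanning_intervals = []
--     for (interval_name, _, _) in intervals:
--         if interval_name == r1_interval or interval_name == r2_interval:
--             if not start:
--                 start = True
--             else:
--                 start = False
--         if start:
--             spanning_intervals.append(interval_name)
--     return spanning_intervals
-- ===== SOURCE B (Python) =====
-- def get_spanning_intervals(intervals: list, r1_interval: str, r2_interval: str) -> list: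
--     """Returns the intervals the spanning pair uses."""
--     names = [interval_name for (interval_name, _, _) in intervals]
--     idx = [i for i, n in enumerate(names) if n == r1_interval or n == r2_interval]
--     out = []
--     k = 0
--     while k + 1 < len(idx):
--         out += names[idx[k]:idx[k + 1]]
--         k += 2
--     if len(idx) % 2 == 1:
--         out += names[idx[-1]:]
--     return out
-- ===== Notes on version B (the rewrite author's own statement) =====
-- stated objective: alternative
-- what changed: Instead of a single toggle-flag scan appending names one by one, B first collects the indices of the boundary matches and then emits the toggle regions as whole slices names[idx[2k]:idx[2k+1]] plus a final open slice when the match count is odd.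
import Mathlib
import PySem

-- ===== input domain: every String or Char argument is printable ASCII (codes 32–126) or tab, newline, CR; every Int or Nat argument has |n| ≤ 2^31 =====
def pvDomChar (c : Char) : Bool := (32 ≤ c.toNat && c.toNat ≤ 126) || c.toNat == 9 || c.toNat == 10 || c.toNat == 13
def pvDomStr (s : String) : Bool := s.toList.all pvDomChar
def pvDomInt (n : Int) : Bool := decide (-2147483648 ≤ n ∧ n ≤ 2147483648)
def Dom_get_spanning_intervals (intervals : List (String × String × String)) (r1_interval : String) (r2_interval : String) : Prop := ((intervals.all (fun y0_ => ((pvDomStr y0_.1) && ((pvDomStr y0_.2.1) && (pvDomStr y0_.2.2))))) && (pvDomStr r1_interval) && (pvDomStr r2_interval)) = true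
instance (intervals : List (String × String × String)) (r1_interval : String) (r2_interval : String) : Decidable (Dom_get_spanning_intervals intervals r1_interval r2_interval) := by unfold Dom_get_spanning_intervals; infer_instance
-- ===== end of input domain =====

-- B locates the boundary matches once and emits the toggle regions as slices (same values, different decomposition; objective: alternative).

-- ===== PORT A =====
-- Literal port of A: one fold over the intervals carrying the toggle flag and the accumulator.
def get_spanning_intervals (intervals : List (String × String × String)) (r1_interval : String) (r2_interval : String) : List String :=
  (intervals.foldl
    (fun (st : Bool × List String) t =>
      let start := if t.1 = r1_interval ∨ t.1 = r2_interval then !st.1 else st.1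
      (start, if start then st.2 ++ [t.1] else st.2))
    (false, [])).2

-- ===== PORT B =====
-- the while-loop of Source B consuming idx two at a time, with the odd leftover sliced to the end
def gsiGo (names : List String) : List Int → List String
  | i :: j :: rest => PySem.List.slice names (some i) (some j) ++ gsiGo names rest
  | [i] => PySem.List.slice names (some i) none
  | [] => []

def get_spanning_intervals_alt (intervals : List (String × String × String)) (r1_interval : String) (r2_interval : String) : List String :=
  let names := intervals.map (fun t => t.1)
  let idx := ((PySem.List.enumerate names 0).filter
      (fun p => decide (p.2 = r1_interval ∨ p.2 = r2_interval))).map (·.1)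
  gsiGo names idx

-- ===== PRECONDITION & SPEC =====
def Spec_get_spanning_intervals (intervals : List (String × String × String)) (r1_interval : String) (r2_interval : String) (out : List String) : Prop := out = get_spanning_intervals_alt intervals r1_interval r2_interval
instance (intervals : List (String × String × String)) (r1_interval : String) (r2_interval : String) (out : List String) : Decidable (Spec_get_spanning_intervals intervals r1_interval r2_interval out) := by unfold Spec_get_spanning_intervals; infer_instance

-- ===== CLAIM (what is proved, stated in full; the proofs are below) =====
def Claim_equal_get_spanning_intervals : Prop := ∀ (intervals : List (String × String × String)) (r1_interval : String) (r2_interval : String), Dom_get_spanning_intervals intervals r1_interval r2_interval → Spec_get_spanning_intervals intervals r1_interval r2_interval (get_spanning_intervals intervals r1_interval r2_interval)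

-- ===== LEMMAS AND PROOFS =====

-- reference recursions: specT = toggle off, specU = toggle on (collecting)
mutual
def specT (r1 r2 : String) : List String → List String
  | [] => []
  | n :: rest => if n = r1 ∨ n = r2 then n :: specU r1 r2 rest else specT r1 r2 rest
def specU (r1 r2 : String) : List String → List String
  | [] => []
  | n :: rest => if n = r1 ∨ n = r2 then specT r1 r2 rest else n :: specU r1 r2 rest
end

-- match positions, as Nats, of a name list
def mIdxN (r1 r2 : String) : List String → List Nat
  | [] => []
  | n :: rest => if n = r1 ∨ n = r2 then 0 :: (mIdxN r1 r2 rest).map (· + 1)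
                 else (mIdxN r1 r2 rest).map (· + 1)

-- gsiGo on natural indices, with slices reduced to drop/take
def gsiGoN (names : List String) : List Nat → List String
  | i :: j :: rest => (names.drop i).take (j - i) ++ gsiGoN names rest
  | [i] => names.drop i
  | [] => []

-- A's step function, named so the fold lemma can be applied
def stepA (r1 r2 : String) (st : Bool × List String) (t : String × String × String) : Bool × List String :=
  let start := if t.1 = r1 ∨ t.1 = r2 then !st.1 else st.1
  (start, if start then st.2 ++ [t.1] else st.2)

theorem gsiGo_natCast (names : List String) (idx : List Nat) :
    gsiGo names (idx.map Int.ofNat) = gsiGoN names idx := by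
  fun_induction gsiGoN names idx with
  | case1 i j rest ih =>
      simp only [List.map_cons, gsiGo, Int.ofNat_eq_natCast]
      rw [PySem.List.slice_natCast, ih]
  | case2 i =>
      simp only [List.map_cons, List.map_nil, gsiGo, Int.ofNat_eq_natCast]
      rw [PySem.List.slice_from_natCast]
  | case3 => simp only [List.map_nil, gsiGo]

theorem gsiGoN_shift (a : String) (names : List String) (idx : List Nat) :
    gsiGoN (a :: names) (idx.map (· + 1)) = gsiGoN names idx := by
  fun_induction gsiGoN names idx with
  | case1 i j rest ih =>
      simp only [List.map_cons, gsiGoN, List.drop_succ_cons, Nat.succ_sub_succ, ih]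
  | case2 i => simp only [List.map_cons, List.map_nil, gsiGoN, List.drop_succ_cons]
  | case3 => simp only [List.map_nil, gsiGoN]

theorem mIdxN_nil_specU (r1 r2 : String) (l : List String)
    (h : mIdxN r1 r2 l = []) : specU r1 r2 l = l := by
  induction l with
  | nil => simp [specU]
  | cons n rest ih =>
      by_cases hm : n = r1 ∨ n = r2
      · simp [mIdxN, hm] at h
      · simp [mIdxN, hm, List.map_eq_nil_iff] at h
        simp [specU, hm, ih h]

theorem main_aux (r1 r2 : String) (N : Nat) :
    ∀ names : List String, names.length ≤ N →
      (gsiGoN names (mIdxN r1 r2 names) = specT r1 r2 names) ∧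
      (∀ j idx2, mIdxN r1 r2 names = j :: idx2 →
        specU r1 r2 names = names.take j ++ gsiGoN names idx2) := by
  induction N with
  | zero =>
      intro names hlen
      have hnil : names = [] := List.eq_nil_of_length_eq_zero (Nat.le_zero.mp hlen)
      subst hnil
      refine ⟨by simp [gsiGoN, mIdxN, specT], ?_⟩
      intro j idx2 h; simp [mIdxN] at h
  | succ N ih =>
      intro names hlen
      cases names with
      | nil =>
          refine ⟨by simp [gsiGoN, mIdxN, specT], ?_⟩
          intro j idx2 h; simp [mIdxN] at h
      | cons n rest =>
          have hr := ih rest (by simpa using Nat.lt_succ_iff.mp (Nat.lt_of_lt_of_le (by simp) hlen))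
          constructor
          · by_cases hm : n = r1 ∨ n = r2
            · cases hrest : mIdxN r1 r2 rest with
              | nil =>
                  simp [mIdxN, hm, hrest, gsiGoN, specT,
                        mIdxN_nil_specU r1 r2 rest hrest]
              | cons j idx2 =>
                  have h2 := hr.2 j idx2 hrest
                  simp only [mIdxN, if_pos hm, hrest, List.map_cons]
                  show gsiGoN (n :: rest) (0 :: (j+1) :: idx2.map (· + 1)) = specT r1 r2 (n :: rest)
                  have hstep : gsiGoN (n :: rest) (0 :: (j+1) :: idx2.map (· + 1)) =
                      ((n :: rest).drop 0).take (j + 1 - 0) ++ gsiGoN (n :: rest) (idx2.map (· + 1)) := by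
                    simp [gsiGoN]
                  rw [hstep, gsiGoN_shift]
                  simp [specT, hm, h2]
            · simp only [mIdxN, if_neg hm]
              rw [gsiGoN_shift, hr.1]
              simp [specT, hm]
          · intro j idx2 h
            by_cases hm : n = r1 ∨ n = r2
            · simp [mIdxN, hm] at h
              obtain ⟨hj, hidx⟩ := h
              subst hj; subst hidx
              rw [gsiGoN_shift, hr.1]
              simp [specU, hm]
            · simp [mIdxN, hm] at h
              cases hrest : mIdxN r1 r2 rest with
              | nil => rw [hrest] at h; simp at h
              | cons j' idx2' =>
                  rw [hrest] at h
                  simp at h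
                  obtain ⟨hj, hidx⟩ := h
                  subst hj; subst hidx
                  rw [gsiGoN_shift]
                  simp [specU, hm, List.take_succ_cons, hr.2 j' idx2' hrest]

-- enumerate+filter+map computes exactly the (shifted) match indices
theorem enum_filter_idx (r1 r2 : String) (names : List String) (s : Int) :
    ((PySem.List.enumerate names s).filter
        (fun p => decide (p.2 = r1 ∨ p.2 = r2))).map (·.1)
      = (mIdxN r1 r2 names).map (fun n => Int.ofNat n + s) := by
  induction names generalizing s with
  | nil => simp [PySem.List.enumerate_nil, mIdxN]
  | cons n rest ih =>
      rw [PySem.List.enumerate_cons, List.filter_cons]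
      by_cases hm : n = r1 ∨ n = r2
      · have hc : (fun p : Int × String => decide (p.2 = r1 ∨ p.2 = r2)) (s, n) = true := by
          simp [hm]
        rw [if_pos hc]
        simp only [List.map_cons, ih (s + 1)]
        simp only [mIdxN, if_pos hm, List.map_cons, List.map_map]
        congr 1
        · simp
        · apply List.map_congr_left; intro a _; simp only [Function.comp_apply, Int.ofNat_eq_natCast]; push_cast; ring
      · have hc : (fun p : Int × String => decide (p.2 = r1 ∨ p.2 = r2)) (s, n) = false := by
          simp [hm]
        rw [if_neg (by simp [hc])]
        rw [ih (s + 1)]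
        simp only [mIdxN, if_neg hm, List.map_map]
        apply List.map_congr_left; intro a _; simp only [Function.comp_apply, Int.ofNat_eq_natCast]; push_cast; ring

-- A's fold with an arbitrary state equals the reference recursions
theorem foldA (r1 r2 : String) (l : List (String × String × String)) (s : Bool) (acc : List String) :
    (l.foldl (stepA r1 r2) (s, acc)).2
    = acc ++ (if s then specU r1 r2 (l.map (fun t => t.1)) else specT r1 r2 (l.map (fun t => t.1))) := by
  induction l generalizing s acc with
  | nil => cases s <;> simp [specT, specU]
  | cons t rest ih =>
      rw [List.foldl_cons]
      by_cases hm : t.1 = r1 ∨ t.1 = r2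
      · cases s
        · have hs : stepA r1 r2 (false, acc) t = (true, acc ++ [t.1]) := by simp [stepA, hm]
          rw [hs, ih]
          simp [specT, hm]
        · have hs : stepA r1 r2 (true, acc) t = (false, acc) := by simp [stepA, hm]
          rw [hs, ih]
          simp [specU, hm]
      · cases s
        · have hs : stepA r1 r2 (false, acc) t = (false, acc) := by simp [stepA, hm]
          rw [hs, ih]
          simp [specT, hm]
        · have hs : stepA r1 r2 (true, acc) t = (true, acc ++ [t.1]) := by simp [stepA, hm]
          rw [hs, ih]
          simp [specU, hm]

-- ===== VERDICT (by name: the statement is the Claim_ definition above) =====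
theorem get_spanning_intervals_spec : Claim_equal_get_spanning_intervals := by
  intro intervals r1 r2 _
  show get_spanning_intervals intervals r1 r2 = get_spanning_intervals_alt intervals r1 r2
  have hA : get_spanning_intervals intervals r1 r2 = (intervals.foldl (stepA r1 r2) (false, [])).2 := rfl
  rw [hA, foldA]
  simp only [if_neg Bool.false_ne_true, List.nil_append]
  show _ = gsiGo (intervals.map (fun t => t.1))
      (((PySem.List.enumerate (intervals.map (fun t => t.1)) 0).filter
        (fun p => decide (p.2 = r1 ∨ p.2 = r2))).map (·.1))
  rw [enum_filter_idx]
  have hz : (mIdxN r1 r2 (intervals.map (fun t => t.1))).map (fun n => Int.ofNat n + 0)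
       = (mIdxN r1 r2 (intervals.map (fun t => t.1))).map Int.ofNat := by
    simp
  rw [hz, gsiGo_natCast]
  exact ((main_aux r1 r2 (intervals.map (fun t => t.1)).length
    (intervals.map (fun t => t.1)) le_rfl).1).symm
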